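-- pv_equiv track=rewrite | github.com/lancelote/advent_of_code | src/year2022/day16b.py | left_score
-- ===== SOURCE A (Python) =====
-- def left_score(
--     flow_rate: dict[str, int], released_valves: frozenset[str], minute: int = 0
-- ) -> int:
--     total_score = 0
--
--     for valve, score in flow_rate.items():
--         if valve not in released_valves:
--             total_score += score * minute
--
--     return total_score
-- ===== SOURCE B (Python) =====
-- def left_score(flow_rate, released_valves, minute=0):
--     total_all = sum(flow_rate.values())
--     released_sum = sum(s for v, s in flow_rate.items() if v in released_valves)
--     return (total_all - released_sum) * minute
-- ===== Notes on version B (the rewrite author's own statement) =====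
-- stated objective: alternative
-- what changed: B computes the result by complement: total of all flow rates minus the sum of rates of released valves, multiplied by minute once at the end, instead of A's guarded accumulation that multiplies each term by minute.
import Mathlib
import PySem

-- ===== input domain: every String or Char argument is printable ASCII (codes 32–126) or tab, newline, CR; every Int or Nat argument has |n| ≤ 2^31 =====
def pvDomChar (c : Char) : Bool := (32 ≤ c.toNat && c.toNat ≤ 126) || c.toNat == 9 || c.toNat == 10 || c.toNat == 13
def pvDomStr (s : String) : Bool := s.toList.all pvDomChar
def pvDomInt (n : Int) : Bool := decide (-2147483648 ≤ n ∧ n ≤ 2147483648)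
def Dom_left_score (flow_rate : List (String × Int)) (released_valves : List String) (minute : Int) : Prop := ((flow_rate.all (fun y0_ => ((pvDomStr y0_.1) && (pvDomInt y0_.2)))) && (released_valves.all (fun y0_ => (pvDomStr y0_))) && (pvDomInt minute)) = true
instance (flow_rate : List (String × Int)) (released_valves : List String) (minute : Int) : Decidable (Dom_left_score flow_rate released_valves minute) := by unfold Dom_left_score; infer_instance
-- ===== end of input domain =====

-- ===== PORT A =====
-- A: accumulate score*minute for each valve not in released_valves
def left_score (flow_rate : List (String × Int)) (released_valves : List String) (minute : Int) : Int :=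
  flow_rate.foldl
    (fun total_score p =>
      if ¬ released_valves.contains p.1 then total_score + p.2 * minute else total_score)
    0

-- ===== PORT B =====
-- B: complement — (sum of all rates − sum of released rates) * minute, one multiply at the end
def left_score_alt (flow_rate : List (String × Int)) (released_valves : List String) (minute : Int) : Int :=
  let total_all := flow_rate.foldl (fun acc p => acc + p.2) 0
  let released_sum := flow_rate.foldl
    (fun acc p => if released_valves.contains p.1 then acc + p.2 else acc) 0
  (total_all - released_sum) * minute

-- ===== PRECONDITION & SPEC =====
def Spec_left_score (flow_rate : List (String × Int)) (released_valves : List String) (minute : Int) (out : Int) : Prop := out = left_score_alt flow_rate released_valves minute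
instance (flow_rate : List (String × Int)) (released_valves : List String) (minute : Int) (out : Int) : Decidable (Spec_left_score flow_rate released_valves minute out) := by unfold Spec_left_score; infer_instance

-- ===== CLAIM (what is proved, stated in full; the proofs are below) =====
def Claim_equal_left_score : Prop := ∀ (flow_rate : List (String × Int)) (released_valves : List String) (minute : Int), Dom_left_score flow_rate released_valves minute → Spec_left_score flow_rate released_valves minute (left_score flow_rate released_valves minute)

-- ===== LEMMAS AND PROOFS =====

-- ===== VERDICT (by name: the statement is the Claim_ definition above) =====
-- shift lemmas: pull the accumulator out of each fold
theorem pv_foldA_shift (rv : List String) (m : Int) :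
    ∀ (l : List (String × Int)) (a : Int),
      l.foldl (fun t p => if ¬ rv.contains p.1 then t + p.2 * m else t) a
        = a + l.foldl (fun t p => if ¬ rv.contains p.1 then t + p.2 * m else t) 0 := by
  intro l
  induction l with
  | nil => intro a; simp
  | cons p l ih =>
    intro a
    simp only [List.foldl_cons]
    rw [ih, ih (if ¬ rv.contains p.1 then 0 + p.2 * m else 0)]
    split_ifs <;> ring

theorem pv_foldT_shift :
    ∀ (l : List (String × Int)) (a : Int),
      l.foldl (fun acc p => acc + p.2) a = a + l.foldl (fun acc p => acc + p.2) 0 := by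
  intro l
  induction l with
  | nil => intro a; simp
  | cons p l ih =>
    intro a
    simp only [List.foldl_cons]
    rw [ih, ih (0 + p.2)]
    ring

theorem pv_foldR_shift (rv : List String) :
    ∀ (l : List (String × Int)) (a : Int),
      l.foldl (fun acc p => if rv.contains p.1 then acc + p.2 else acc) a
        = a + l.foldl (fun acc p => if rv.contains p.1 then acc + p.2 else acc) 0 := by
  intro l
  induction l with
  | nil => intro a; simp
  | cons p l ih =>
    intro a
    simp only [List.foldl_cons]
    rw [ih, ih (if rv.contains p.1 then 0 + p.2 else 0)]
    split_ifs <;> ring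

theorem pv_main (rv : List String) (m : Int) :
    ∀ (l : List (String × Int)),
      l.foldl (fun t p => if ¬ rv.contains p.1 then t + p.2 * m else t) 0
        = (l.foldl (fun acc p => acc + p.2) 0
            - l.foldl (fun acc p => if rv.contains p.1 then acc + p.2 else acc) 0) * m := by
  intro l
  induction l with
  | nil => simp
  | cons p l ih =>
    simp only [List.foldl_cons]
    rw [pv_foldA_shift, pv_foldT_shift, pv_foldR_shift, ih]
    split_ifs <;> ring

theorem left_score_spec : Claim_equal_left_score := by
  intro fr rv m _
  unfold Spec_left_score left_score left_score_alt
  exact pv_main rv m fr
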